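-- pv_equiv track=rewrite | github.com/CrunchyJohnHaven/elastifund | bot/autoresearch_loop.py | _bucket_hours
-- ===== SOURCE A (Python) =====
-- def _bucket_hours(hours: list[int]) -> dict[str, int]:
--     """Bucket hours into trading sessions."""
--     buckets = {"00-06": 0, "06-12": 0, "12-18": 0, "18-24": 0}
--     for h in hours:
--         if h < 6:
--             buckets["00-06"] += 1
--         elif h < 12:
--             buckets["06-12"] += 1
--         elif h < 18:
--             buckets["12-18"] += 1
--         else:
--             buckets["18-24"] += 1
--     return {k: v for k, v in buckets.items() if v > 0}
-- ===== SOURCE B (Python) =====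
-- def _bucket_hours(hours: list[int]) -> dict[str, int]:
--     """Bucket hours into trading sessions (four independent counting passes)."""
--     counts = {
--         "00-06": sum(1 for h in hours if h < 6),
--         "06-12": sum(1 for h in hours if 6 <= h < 12),
--         "12-18": sum(1 for h in hours if 12 <= h < 18),
--         "18-24": sum(1 for h in hours if h >= 18),
--     }
--     return {k: v for k, v in counts.items() if v > 0}
-- ===== Notes on version B (the rewrite author's own statement) =====
-- stated objective: alternative
-- what changed: Replaced the single routing loop over a mutable dict with four independent counting passes (one boolean-sum per bucket) whose predicates partition the hours exactly as A's if/elif chain; same key order and the same v>0 filter.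
import Mathlib
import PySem

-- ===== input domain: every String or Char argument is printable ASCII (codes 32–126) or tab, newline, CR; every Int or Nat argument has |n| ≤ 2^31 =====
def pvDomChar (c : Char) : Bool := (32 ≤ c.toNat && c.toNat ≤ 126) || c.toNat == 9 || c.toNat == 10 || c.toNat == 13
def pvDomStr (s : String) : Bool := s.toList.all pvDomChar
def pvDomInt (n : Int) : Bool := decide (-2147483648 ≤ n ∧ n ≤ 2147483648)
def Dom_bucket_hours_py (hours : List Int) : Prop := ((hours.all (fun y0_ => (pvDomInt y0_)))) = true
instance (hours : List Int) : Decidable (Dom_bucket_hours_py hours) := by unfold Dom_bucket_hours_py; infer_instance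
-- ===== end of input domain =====

-- B replaces A's single routing loop over a mutable dict by four independent counting passes; alternative decomposition, same cost class.


-- ===== PORT A =====
def bucket_hours_py (hours : List Int) : List (String × Int) :=
  let buckets : PySem.Dict String Int :=
    PySem.Dict.ofList [("00-06", 0), ("06-12", 0), ("12-18", 0), ("18-24", 0)]
  let buckets := hours.foldl (fun b h =>
    if h < 6 then b.modify "00-06" 0 (· + 1)
    else if h < 12 then b.modify "06-12" 0 (· + 1)
    else if h < 18 then b.modify "12-18" 0 (· + 1)
    else b.modify "18-24" 0 (· + 1)) buckets
  buckets.items.filter (fun kv => kv.2 > 0)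

-- ===== PORT B =====
def bucket_hours_py_alt (hours : List Int) : List (String × Int) :=
  let counts : List (String × Int) :=
    [("00-06", (hours.countP (fun h => h < 6) : Int)),
     ("06-12", (hours.countP (fun h => 6 ≤ h ∧ h < 12) : Int)),
     ("12-18", (hours.countP (fun h => 12 ≤ h ∧ h < 18) : Int)),
     ("18-24", (hours.countP (fun h => 18 ≤ h) : Int))]
  counts.filter (fun kv => kv.2 > 0)

-- ===== PRECONDITION & SPEC =====
def Spec_bucket_hours_py (hours : List Int) (out : List (String × Int)) : Prop := out = bucket_hours_py_alt hours
instance (hours : List Int) (out : List (String × Int)) : Decidable (Spec_bucket_hours_py hours out) := by unfold Spec_bucket_hours_py; infer_instance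

-- ===== CLAIM (what is proved, stated in full; the proofs are below) =====
def Claim_equal_bucket_hours_py : Prop := ∀ (hours : List Int), Dom_bucket_hours_py hours → Spec_bucket_hours_py hours (bucket_hours_py hours)

-- ===== LEMMAS AND PROOFS =====

-- Invariant of A's loop: the fold keeps the literal 4-key dict, each count increased by the matching bucket's countP.
theorem bucket_fold_eq (hours : List Int) (a b c d : Int) :
    hours.foldl (fun b h =>
      if h < 6 then b.modify "00-06" 0 (· + 1)
      else if h < 12 then b.modify "06-12" 0 (· + 1)
      else if h < 18 then b.modify "12-18" 0 (· + 1)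
      else b.modify "18-24" 0 (· + 1))
      (PySem.Dict.mk [("00-06", a), ("06-12", b), ("12-18", c), ("18-24", d)]) =
    PySem.Dict.mk [("00-06", a + hours.countP (fun h => decide (h < 6))),
                   ("06-12", b + hours.countP (fun h => decide (6 ≤ h ∧ h < 12))),
                   ("12-18", c + hours.countP (fun h => decide (12 ≤ h ∧ h < 18))),
                   ("18-24", d + hours.countP (fun h => decide (18 ≤ h)))] := by
  induction hours generalizing a b c d with
  | nil => simp
  | cons h t ih =>
    simp only [List.foldl_cons, List.countP_cons]
    by_cases h6 : h < 6
    · simp only [if_pos h6]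
      rw [show (PySem.Dict.mk [("00-06", a), ("06-12", b), ("12-18", c), ("18-24", d)]).modify
          "00-06" 0 (· + 1) = PySem.Dict.mk [("00-06", a + 1), ("06-12", b), ("12-18", c), ("18-24", d)]
          from by simp [PySem.Dict.modify, PySem.Dict.getD, PySem.Dict.get?, PySem.Dict.insert,
            PySem.Dict.contains]]
      rw [ih]
      have h12 : ¬ (6 ≤ h ∧ h < 12) := by omega
      have h18 : ¬ (12 ≤ h ∧ h < 18) := by omega
      have h24 : ¬ (18 ≤ h) := by omega
      simp [h6, h12, h18, h24]; ring
    · by_cases h12 : h < 12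
      · simp only [if_neg h6, if_pos h12]
        rw [show (PySem.Dict.mk [("00-06", a), ("06-12", b), ("12-18", c), ("18-24", d)]).modify
            "06-12" 0 (· + 1) = PySem.Dict.mk [("00-06", a), ("06-12", b + 1), ("12-18", c), ("18-24", d)]
            from by simp [PySem.Dict.modify, PySem.Dict.getD, PySem.Dict.get?, PySem.Dict.insert,
              PySem.Dict.contains]]
        rw [ih]
        have hb : (6 ≤ h ∧ h < 12) := by omega
        have h18 : ¬ (12 ≤ h ∧ h < 18) := by omega
        have h24 : ¬ (18 ≤ h) := by omega
        simp [h6, hb, h18, h24]; ring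
      · by_cases h18 : h < 18
        · simp only [if_neg h6, if_neg h12, if_pos h18]
          rw [show (PySem.Dict.mk [("00-06", a), ("06-12", b), ("12-18", c), ("18-24", d)]).modify
              "12-18" 0 (· + 1) = PySem.Dict.mk [("00-06", a), ("06-12", b), ("12-18", c + 1), ("18-24", d)]
              from by simp [PySem.Dict.modify, PySem.Dict.getD, PySem.Dict.get?, PySem.Dict.insert,
                PySem.Dict.contains]]
          rw [ih]
          have hc : (12 ≤ h ∧ h < 18) := by omega
          have hb : ¬ (6 ≤ h ∧ h < 12) := by omega
          have h24 : ¬ (18 ≤ h) := by omega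
          simp [h6, hb, hc, h24]; ring
        · simp only [if_neg h6, if_neg h12, if_neg h18]
          rw [show (PySem.Dict.mk [("00-06", a), ("06-12", b), ("12-18", c), ("18-24", d)]).modify
              "18-24" 0 (· + 1) = PySem.Dict.mk [("00-06", a), ("06-12", b), ("12-18", c), ("18-24", d + 1)]
              from by simp [PySem.Dict.modify, PySem.Dict.getD, PySem.Dict.get?, PySem.Dict.insert,
                PySem.Dict.contains]]
          rw [ih]
          have hd : (18 ≤ h) := by omega
          have hb : ¬ (6 ≤ h ∧ h < 12) := by omega
          have hc : ¬ (12 ≤ h ∧ h < 18) := by omega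
          simp [h6, hb, hc, hd]; ring

-- ===== VERDICT (by name: the statement is the Claim_ definition above) =====
theorem bucket_hours_py_spec : Claim_equal_bucket_hours_py := by
  intro hours _
  unfold Spec_bucket_hours_py bucket_hours_py bucket_hours_py_alt
  have h0 : PySem.Dict.ofList [("00-06", (0:Int)), ("06-12", 0), ("12-18", 0), ("18-24", 0)] =
      PySem.Dict.mk [("00-06", 0), ("06-12", 0), ("12-18", 0), ("18-24", 0)] := by decide
  simp only [h0, bucket_fold_eq, zero_add]
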